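-- pv_equiv track=rewrite | github.com/rebuilder945/FL_research | ast_research/python_code_5.23/lastterm_page7/success_code/张会-3225-2023-04-17_15_28_30.py | work
-- ===== SOURCE A (Python) =====
-- def work(a) :
--     m = {0:1}
--     b=1
--     for i in range(1,a+1):
--         for j in range(i-1):
--                 b=b*(j+1)
--         m[i]=b
--     return m
-- ===== SOURCE B (Python) =====
-- def work(a):
--     # pass 1: table of factorials 0!, 1!, ..., (a-1)!
--     facts = []
--     f = 1
--     for k in range(a):
--         facts.append(f)
--         f = f * (k + 1)
--     # pass 2: running products of the table
--     m = {0: 1}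
--     p = 1
--     for i, q in enumerate(facts, start=1):
--         p = p * q
--         m[i] = p
--     return m
-- ===== Notes on version B (the rewrite author's own statement) =====
-- stated objective: faster
-- what changed: A recomputes each factorial with a nested loop, multiplying the huge running product by every small factor again and again; B first builds the factorial table in one pass and then forms its running products in a second pass, so the big running product is touched only once per key.
import Mathlib
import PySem

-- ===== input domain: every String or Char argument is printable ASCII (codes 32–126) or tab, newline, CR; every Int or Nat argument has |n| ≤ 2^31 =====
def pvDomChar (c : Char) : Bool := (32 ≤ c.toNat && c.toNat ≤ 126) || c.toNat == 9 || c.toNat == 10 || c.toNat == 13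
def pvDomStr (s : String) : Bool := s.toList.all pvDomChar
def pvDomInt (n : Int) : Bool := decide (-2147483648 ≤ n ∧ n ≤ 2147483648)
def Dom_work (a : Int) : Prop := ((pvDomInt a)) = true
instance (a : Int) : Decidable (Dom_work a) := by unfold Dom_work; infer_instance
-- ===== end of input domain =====

-- B replaces A's interleaved nested recomputation by a factorial table + one accumulate pass (objective: alternative decomposition).

-- ===== PORT A =====
def work (a : Int) : List (Int × Int) :=
  let r := (PySem.List.pyRange 1 (a+1) 1).foldl
    (fun (s : PySem.Dict Int Int × Int) i =>
      let b := (PySem.List.pyRange 0 (i-1) 1).foldl (fun b j => b * (j+1)) s.2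
      (s.1.insert i b, b))
    (PySem.Dict.ofList [(0, 1)], 1)
  r.1.items

-- ===== PORT B =====
def work_alt (a : Int) : List (Int × Int) :=
  let fs := (PySem.List.pyRange 0 a 1).foldl
    (fun (s : List Int × Int) k => (s.1 ++ [s.2], s.2 * (k + 1))) ([], 1)
  let r := (PySem.List.enumerate fs.1 1).foldl
    (fun (s : PySem.Dict Int Int × Int) iq => (s.1.insert iq.1 (s.2 * iq.2), s.2 * iq.2))
    (PySem.Dict.ofList [(0, 1)], 1)
  r.1.items

-- ===== PRECONDITION & SPEC =====
def Spec_work (a : Int) (out : List (Int × Int)) : Prop := out = work_alt a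
instance (a : Int) (out : List (Int × Int)) : Decidable (Spec_work a out) := by unfold Spec_work; infer_instance

-- ===== CLAIM (what is proved, stated in full; the proofs are below) =====
def Claim_equal_work : Prop := ∀ (a : Int), Dom_work a → Spec_work a (work a)

-- ===== LEMMAS AND PROOFS =====

-- superfactorial: sf n = 0! * 1! * … * (n-1)!
def sf : Nat → Int
  | 0 => 1
  | n+1 => sf n * n.factorial

-- the common value of both programs
def tbl (n : Nat) : List (Int × Int) :=
  (0, 1) :: (List.range n).map (fun (i : Nat) => ((i : Int) + 1, sf (i + 1)))

-- A's inner loop multiplies by m!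
theorem innerA (m : Nat) (b0 : Int) :
    (PySem.List.pyRange 0 (m : Int) 1).foldl (fun b j => b * (j + 1)) b0
      = b0 * m.factorial := by
  induction m generalizing b0 with
  | zero => simp [PySem.List.pyRange_one_eq_nil]
  | succ n ih =>
      have h : ((n : Int) + 1) = ((n + 1 : Nat) : Int) := by push_cast; ring
      rw [← h, PySem.List.pyRange_one_succ_right (by positivity), List.foldl_append, ih]
      simp only [List.foldl_cons, List.foldl_nil, Nat.factorial_succ]
      push_cast
      ring

theorem insert_tbl (n : Nat) :
    (PySem.Dict.mk (tbl n)).insert ((n : Int) + 1) (sf (n + 1)) = PySem.Dict.mk (tbl (n + 1)) := by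
  have hnc : (PySem.Dict.mk (tbl n)).contains ((n : Int) + 1) = false := by
    rw [PySem.Dict.contains_eq_decide_mem_keys]
    simp only [PySem.Dict.keys, decide_eq_false_iff_not, tbl,
      List.map_cons, List.map_map, List.mem_cons, List.mem_map]
    push_neg
    constructor
    · omega
    · rintro i hi
      simp only [Function.comp]
      intro hcontra
      have : (i : Int) = (n : Int) := by omega
      have : i = n := by exact_mod_cast this
      subst this
      exact absurd (List.mem_range.mp hi) (lt_irrefl _)
  apply PySem.Dict.ext
  rw [PySem.Dict.items_insert_of_not_contains _ _ hnc]
  simp only [tbl, List.range_succ, List.map_append, List.map_cons,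
    List.map_nil, List.cons_append]

theorem outerA (n : Nat) :
    (PySem.List.pyRange 1 ((n : Int) + 1) 1).foldl
      (fun (s : PySem.Dict Int Int × Int) i =>
        let b := (PySem.List.pyRange 0 (i-1) 1).foldl (fun b j => b * (j+1)) s.2
        (s.1.insert i b, b))
      (PySem.Dict.ofList [(0, 1)], 1)
      = (PySem.Dict.mk (tbl n), sf n) := by
  induction n with
  | zero =>
      rw [PySem.List.pyRange_one_eq_nil (by omega)]
      simp only [List.foldl_nil]
      rfl
  | succ n ih =>
      have h : ((n + 1 : Nat) : Int) + 1 = ((n : Int) + 1) + 1 := by push_cast; ring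
      rw [h, PySem.List.pyRange_one_succ_right (by omega), List.foldl_append, ih]
      simp only [List.foldl_cons, List.foldl_nil]
      have h2 : (n : Int) + 1 - 1 = (n : Int) := by ring
      rw [h2, innerA]
      have h3 : sf n * (n.factorial : Int) = sf (n + 1) := rfl
      rw [h3, insert_tbl]

theorem workA (n : Nat) : work ((n : Int)) = tbl n := by
  simp only [work, outerA n]

theorem workA_neg (a : Int) (h : a ≤ 0) : work a = tbl 0 := by
  simp only [work, PySem.List.pyRange_one_eq_nil (by omega : a + 1 ≤ 1), List.foldl_nil]
  rfl

-- B-side lemmas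
theorem factsB (n : Nat) :
    (PySem.List.pyRange 0 ((n : Nat) : Int) 1).foldl
      (fun (s : List Int × Int) k => (s.1 ++ [s.2], s.2 * (k + 1))) ([], 1)
      = ((List.range n).map (fun k => (k.factorial : Int)), (n.factorial : Int)) := by
  induction n with
  | zero =>
      rw [PySem.List.pyRange_one_eq_nil (by simp)]
      rfl
  | succ n ih =>
      have h : ((n + 1 : Nat) : Int) = (n : Int) + 1 := by push_cast; ring
      rw [h, PySem.List.pyRange_one_succ_right (by positivity), List.foldl_append, ih]
      simp only [List.foldl_cons, List.foldl_nil]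
      rw [Prod.ext_iff]
      constructor
      · simp only [List.range_succ, List.map_append, List.map_cons, List.map_nil]
      · show (n.factorial : Int) * ((n : Int) + 1) = ((n + 1).factorial : Int)
        rw [Nat.factorial_succ]; push_cast; ring

theorem bloop (n : Nat) : ∀ (j : Nat),
    ((PySem.List.enumerate ((List.range n).map (fun k => (((j + k).factorial : Int)))) ((j : Int) + 1)).foldl
      (fun (s : PySem.Dict Int Int × Int) iq => (s.1.insert iq.1 (s.2 * iq.2), s.2 * iq.2))
      (PySem.Dict.mk (tbl j), sf j))
      = (PySem.Dict.mk (tbl (j + n)), sf (j + n)) := by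
  induction n with
  | zero =>
      intro j
      rw [show (List.range 0).map (fun k => (((j + k).factorial : Int))) = [] from rfl,
        PySem.List.enumerate_nil, List.foldl_nil]
      rfl
  | succ n ih =>
      intro j
      rw [List.range_succ_eq_map]
      simp only [List.map_cons, List.map_map, PySem.List.enumerate_cons, List.foldl_cons]
      rw [show (sf j * (((j + 0).factorial : Int))) = sf (j + 1) from rfl, insert_tbl j]
      have e1 : ((fun k => (((j + k).factorial : Int))) ∘ Nat.succ)
          = fun k => ((((j + 1) + k).factorial : Int)) := by
        funext k; simp only [Function.comp, Nat.succ_eq_add_one]; congr 2; omega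
      have e2 : ((j : Int) + 1 + 1) = (((j + 1 : Nat) : Int) + 1) := by push_cast; ring
      rw [e1, e2, ih (j + 1), show (j + 1) + n = j + (n + 1) from by omega]

theorem workB (n : Nat) : work_alt ((n : Int)) = tbl n := by
  show ((PySem.List.enumerate
      (((PySem.List.pyRange 0 ((n : Nat) : Int) 1).foldl
        (fun (s : List Int × Int) k => (s.1 ++ [s.2], s.2 * (k + 1))) ([], 1)).1) 1).foldl
      (fun (s : PySem.Dict Int Int × Int) iq => (s.1.insert iq.1 (s.2 * iq.2), s.2 * iq.2))
      (PySem.Dict.ofList [(0, 1)], 1)).1.items = tbl n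
  rw [factsB n]
  have e7 : (fun (k : Nat) => ((k.factorial : Int))) = fun k => (((0 + k).factorial : Int)) := by
    funext k; rw [Nat.zero_add]
  rw [e7]
  have hb := bloop n 0
  rw [Nat.zero_add] at hb
  exact congrArg (fun p => p.1.items) hb

theorem workB_neg (a : Int) (h : a ≤ 0) : work_alt a = tbl 0 := by
  show ((PySem.List.enumerate
      (((PySem.List.pyRange 0 a 1).foldl
        (fun (s : List Int × Int) k => (s.1 ++ [s.2], s.2 * (k + 1))) ([], 1)).1) 1).foldl
      (fun (s : PySem.Dict Int Int × Int) iq => (s.1.insert iq.1 (s.2 * iq.2), s.2 * iq.2))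
      (PySem.Dict.ofList [(0, 1)], 1)).1.items = tbl 0
  rw [PySem.List.pyRange_one_eq_nil h]
  rfl

-- ===== VERDICT (by name: the statement is the Claim_ definition above) =====
theorem work_spec : Claim_equal_work := by
  intro a _
  unfold Spec_work
  by_cases h : a ≤ 0
  · rw [workA_neg a h, workB_neg a h]
  · have ha : a = ((a.toNat : Nat) : Int) := by omega
    rw [ha, workA, workB]
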